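-- pv_equiv track=rewrite | github.com/thesahilalam/EncoPDF-Unlocker | src/attacks.py | aadhaar_gen
-- ===== SOURCE A (Python) =====
-- import itertools
-- import string
--
-- def aadhaar_gen(name="", skip=0):
--     years = range(1950, 2051)
--     current_count = 0
--     if name:
--         prefix = name.upper()[:4]
--         for y in years:
--             if current_count < skip:
--                 current_count += 1
--                 continue
--             yield f"{prefix}{y}"
--     else:
--         for combo in itertools.product(string.ascii_uppercase, repeat=4):
--             prefix = "".join(combo)
--             for y in years:
--                 if current_count < skip:
--                     current_count += 1
--                     continue
--                 yield f"{prefix}{y}"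
-- ===== SOURCE B (Python) =====
-- def aadhaar_gen(name="", skip=0):
--     s = max(skip, 0)
--     if name:
--         prefix = name.upper()[:4]
--         for y in range(1950 + s, 2051):
--             yield f"{prefix}{y}"
--     else:
--         for t in range(s, 26 ** 4 * 101):
--             idx, yoff = divmod(t, 101)
--             letters = "".join(chr(65 + (idx // 26 ** p) % 26) for p in (3, 2, 1, 0))
--             yield f"{letters}{1950 + yoff}"
-- ===== Notes on version B (the rewrite author's own statement) =====
-- stated objective: alternative
-- what changed: A threads a shared skip counter through (nested) loops, generating and discarding every skipped candidate; B clamps skip and jumps arithmetically to the resume point, iterating a single flat range of global candidate indices decoded by divmod into the 4-letter base-26 prefix and year.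
import Mathlib
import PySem

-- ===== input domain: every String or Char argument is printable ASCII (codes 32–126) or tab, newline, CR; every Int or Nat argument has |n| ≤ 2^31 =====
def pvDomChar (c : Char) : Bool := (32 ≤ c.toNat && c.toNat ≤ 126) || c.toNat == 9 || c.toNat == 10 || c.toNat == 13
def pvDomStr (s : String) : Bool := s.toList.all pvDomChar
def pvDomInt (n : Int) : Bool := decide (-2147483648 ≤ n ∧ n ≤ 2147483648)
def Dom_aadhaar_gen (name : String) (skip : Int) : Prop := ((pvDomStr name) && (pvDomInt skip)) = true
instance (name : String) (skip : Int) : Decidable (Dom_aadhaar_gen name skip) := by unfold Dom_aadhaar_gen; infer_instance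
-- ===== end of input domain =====

-- B replaces A's generate-and-discard skip counter by an arithmetic jump to the resume point
-- (a single flat loop over global candidate indices, decoded by divmod); equivalence is about
-- the full yielded sequence (both Pythons are generators, compared as lists).

-- ===== PORT A =====
-- literal port of A: a shared skip counter threaded through the (nested) loops;
-- each `yield` appends to an accumulator list.
def aadhaar_gen (name : String) (skip : Int) : List String :=
  let years := PySem.List.pyRange 1950 2051 1
  if name ≠ "" then
    let pfx := PySem.Str.slice (PySem.Str.upper name) none (some 4)
    (years.foldl (fun (st : Int × List String) y =>
        if st.1 < skip then (st.1 + 1, st.2)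
        else (st.1, st.2 ++ [pfx ++ PySem.Int.toStr y])) ((0 : Int), ([] : List String))).2
  else
    -- itertools.product(string.ascii_uppercase, repeat=4) = four nested loops over the letters,
    -- in the same lexicographic order; the state (count, out) is threaded through all of them.
    let letters := "ABCDEFGHIJKLMNOPQRSTUVWXYZ".toList
    (letters.foldl (fun st0 a =>
      letters.foldl (fun st1 b =>
        letters.foldl (fun st2 c =>
          letters.foldl (fun st3 d =>
            years.foldl (fun (st : Int × List String) y =>
              if st.1 < skip then (st.1 + 1, st.2)
              else (st.1, st.2 ++ [String.ofList [a, b, c, d] ++ PySem.Int.toStr y])) st3)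
          st2) st1) st0) ((0 : Int), ([] : List String))).2

-- ===== PORT B =====
-- literal port of B (Source B): clamp skip, then a single range starting at the resume point;
-- in the combo branch each global index t is decoded by divmod into (prefix index, year offset).
def aadhaar_gen_alt (name : String) (skip : Int) : List String :=
  let s := max skip 0
  if name ≠ "" then
    let pfx := PySem.Str.slice (PySem.Str.upper name) none (some 4)
    (PySem.List.pyRange (1950 + s) 2051 1).map (fun y => pfx ++ PySem.Int.toStr y)
  else
    (PySem.List.pyRange s (26 ^ 4 * 101) 1).map (fun t =>
      let idx := PySem.Int.floordiv t 101
      let yoff := PySem.Int.mod t 101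
      let letters := String.ofList ([3, 2, 1, 0].map (fun p : Nat =>
        Char.ofNat (65 + (PySem.Int.mod (PySem.Int.floordiv idx ((26 : Int) ^ p)) 26).toNat)))
      letters ++ PySem.Int.toStr (1950 + yoff))

-- ===== PRECONDITION & SPEC =====
def Spec_aadhaar_gen (name : String) (skip : Int) (out : List String) : Prop := out = aadhaar_gen_alt name skip
instance (name : String) (skip : Int) (out : List String) : Decidable (Spec_aadhaar_gen name skip out) := by unfold Spec_aadhaar_gen; infer_instance

-- ===== CLAIM (what is proved, stated in full; the proofs are below) =====
def Claim_equal_aadhaar_gen : Prop := ∀ (name : String) (skip : Int), Dom_aadhaar_gen name skip → Spec_aadhaar_gen name skip (aadhaar_gen name skip)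

-- ===== LEMMAS AND PROOFS =====

-- the skip-counter loop step of A, on already-formatted candidates
def pvStep (skip : Int) (st : Int × List String) (x : String) : Int × List String :=
  if st.1 < skip then (st.1 + 1, st.2) else (st.1, st.2 ++ [x])

-- A's skip loop over any candidate list drops the first (skip - c) candidates
theorem pvSkipFoldl (skip : Int) :
    ∀ (xs : List String) (c : Int) (acc : List String),
      xs.foldl (pvStep skip) (c, acc)
        = (c + ((min xs.length (skip - c).toNat : Nat) : Int), acc ++ xs.drop (skip - c).toNat) := by
  intro xs
  induction xs with
  | nil => intro c acc; simp
  | cons x xs ih =>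
    intro c acc
    by_cases h : c < skip
    · have h1 : (skip - c).toNat = (skip - (c + 1)).toNat + 1 := by omega
      simp only [List.foldl_cons, pvStep, if_pos h, ih, h1, List.drop_succ_cons,
        List.length_cons]
      simp only [Prod.mk.injEq]
      exact ⟨by omega, trivial⟩
    · have h0 : (skip - c).toNat = 0 := by omega
      simp only [List.foldl_cons, pvStep, if_neg h, ih, h0, List.drop_zero, List.length_cons]
      simp only [Prod.mk.injEq]
      exact ⟨by omega, by simp⟩
  
-- folding over a flatMap is the nested fold
theorem pvFoldlFlatMap {α β σ : Type} (l : List α) (h : α → List β) (g : σ → β → σ) (init : σ) :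
    (l.flatMap h).foldl g init = l.foldl (fun s x => (h x).foldl g s) init := by
  induction l generalizing init with
  | nil => rfl
  | cons x xs ih => simp [List.flatMap_cons, List.foldl_append, ih]

-- dropping from a unit-step range advances its start
theorem pvDropPyRange (n : Nat) : ∀ (a b : Int),
    (PySem.List.pyRange a b 1).drop n = PySem.List.pyRange (a + n) b 1 := by
  induction n with
  | zero => intro a b; simp
  | succ n ih =>
    intro a b
    by_cases h : a < b
    · rw [PySem.List.pyRange_one_cons h]
      simp only [List.drop_succ_cons, ih]
      congr 1
      push_cast
      ring
    · rw [PySem.List.pyRange_one_eq_nil (by omega), PySem.List.pyRange_one_eq_nil (by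
        have : (0:Int) ≤ (n+1 : Nat) := by positivity
        push_cast
        omega)]
      simp

-- shifting a unit-step range = shifting the mapped function's argument
theorem pvMapPyRangeShift {α : Type} (g : Int → α) (t a b : Int) :
    (PySem.List.pyRange (t + a) (t + b) 1).map g
      = (PySem.List.pyRange a b 1).map (fun j => g (t + j)) := by
  rw [PySem.List.pyRange_one, PySem.List.pyRange_one]
  have hb : (t + b - (t + a)).toNat = (b - a).toNat := by omega
  rw [hb, List.map_map, List.map_map]
  apply List.map_congr_left
  intro k _
  simp only [Function.comp_apply]
  congr 1
  ring

-- a map over range(0, N*M) splits into N blocks of M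
theorem pvMapPyRangeMulNat {α : Type} (g : Int → α) (M : Nat) : ∀ (N : Nat),
    (PySem.List.pyRange 0 ((N : Int) * (M : Int)) 1).map g
      = (PySem.List.pyRange 0 (N : Int) 1).flatMap
          (fun i => (PySem.List.pyRange 0 (M : Int) 1).map (fun j => g (i * (M : Int) + j))) := by
  intro N
  induction N with
  | zero => simp [PySem.List.pyRange_one_eq_nil]
  | succ N ih =>
    have hNM : (0:Int) ≤ (N : Int) * (M : Int) := by positivity
    have hsplit : PySem.List.pyRange 0 (((N:Nat)+1 : Int) * (M : Int)) 1
        = PySem.List.pyRange 0 ((N : Int) * (M : Int)) 1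
          ++ PySem.List.pyRange ((N : Int) * (M : Int)) (((N:Nat)+1 : Int) * (M : Int)) 1 := by
      apply PySem.List.pyRange_one_append
      · exact hNM
      · nlinarith [Int.natCast_nonneg M]
    have hsucc : PySem.List.pyRange 0 (((N:Nat)+1) : Int) 1
        = PySem.List.pyRange 0 (N : Int) 1 ++ [(N : Int)] := by
      exact_mod_cast PySem.List.pyRange_one_succ_right (Int.natCast_nonneg N)
    have hcast : ((N + 1 : Nat) : Int) = ((N : Nat) : Int) + 1 := by push_cast; ring
    rw [hcast] at *
    rw [hsplit, List.map_append, ih, hsucc, List.flatMap_append]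
    congr 1
    have hlast : PySem.List.pyRange ((N : Int) * (M : Int)) (((N : Int)+1) * (M : Int)) 1
        = PySem.List.pyRange ((N : Int) * (M : Int) + 0) ((N : Int) * (M : Int) + (M : Int)) 1 := by
      congr 1
      ring
    rw [hlast, pvMapPyRangeShift]
    simp

-- Int-facing wrapper
theorem pvMapPyRangeMul {α : Type} (g : Int → α) (N M : Int) (hN : 0 ≤ N) (hM : 0 ≤ M) :
    (PySem.List.pyRange 0 (N * M) 1).map g
      = (PySem.List.pyRange 0 N 1).flatMap
          (fun i => (PySem.List.pyRange 0 M 1).map (fun j => g (i * M + j))) := by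
  obtain ⟨n, rfl⟩ := Int.eq_ofNat_of_zero_le hN
  obtain ⟨m, rfl⟩ := Int.eq_ofNat_of_zero_le hM
  exact pvMapPyRangeMulNat g m n

theorem pvFlatMapCongr {α β : Type} (l : List α) (f g : α → List β)
    (h : ∀ x ∈ l, f x = g x) : l.flatMap f = l.flatMap g := by
  unfold List.flatMap
  rw [List.map_congr_left h]

-- B's per-candidate decode function
def pvG (t : Int) : String :=
  let idx := PySem.Int.floordiv t 101
  let yoff := PySem.Int.mod t 101
  let letters := String.ofList ([3, 2, 1, 0].map (fun p : Nat =>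
    Char.ofNat (65 + (PySem.Int.mod (PySem.Int.floordiv idx ((26 : Int) ^ p)) 26).toNat)))
  letters ++ PySem.Int.toStr (1950 + yoff)

def pvChar (i : Int) : Char := Char.ofNat (65 + i.toNat)

-- floor-division and mod on a block decomposition
theorem pvDivmod101 (q m : Int) (hm0 : 0 ≤ m) (hm1 : m < 101) :
    PySem.Int.floordiv (q * 101 + m) 101 = q ∧ PySem.Int.mod (q * 101 + m) 101 = m := by
  have hd : PySem.Int.floordiv (q * 101 + m) 101 = q := by
    rw [PySem.Int.floordiv_eq_iff_of_pos (by omega)]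
    omega
  refine ⟨hd, ?_⟩
  have := PySem.Int.floordiv_mul_add_mod (q * 101 + m) 101
  rw [hd] at this
  omega

theorem pvDiv26 (q r : Int) (hr0 : 0 ≤ r) (hr1 : r < 26) :
    PySem.Int.floordiv (q * 26 + r) 26 = q ∧ PySem.Int.mod (q * 26 + r) 26 = r := by
  have hd : PySem.Int.floordiv (q * 26 + r) 26 = q := by
    rw [PySem.Int.floordiv_eq_iff_of_pos (by omega)]
    omega
  refine ⟨hd, ?_⟩
  have := PySem.Int.floordiv_mul_add_mod (q * 26 + r) 26
  rw [hd] at this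
  omega

-- evaluation of B's decode at an explicitly decomposed index
theorem pvGEval (i j k l m : Int)
    (hi : 0 ≤ i ∧ i < 26) (hj : 0 ≤ j ∧ j < 26) (hk : 0 ≤ k ∧ k < 26)
    (hl : 0 ≤ l ∧ l < 26) (hm : 0 ≤ m ∧ m < 101) :
    pvG (i * (26 ^ 3 * 101) + (j * (26 ^ 2 * 101) + (k * (26 * 101) + (l * 101 + m))))
      = String.ofList [pvChar i, pvChar j, pvChar k, pvChar l] ++ PySem.Int.toStr (1950 + m) := by
  have ht : i * (26 ^ 3 * 101) + (j * (26 ^ 2 * 101) + (k * (26 * 101) + (l * 101 + m)))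
      = (i * 17576 + j * 676 + k * 26 + l) * 101 + m := by ring
  have hdm := pvDivmod101 (i * 17576 + j * 676 + k * 26 + l) m hm.1 hm.2
  have e3 : PySem.Int.mod (PySem.Int.floordiv (i * 17576 + j * 676 + k * 26 + l) ((26:Int)^(3:Nat))) 26 = i := by
    have hd : PySem.Int.floordiv (i * 17576 + j * 676 + k * 26 + l) 17576 = i := by
      rw [PySem.Int.floordiv_eq_iff_of_pos (by omega)]; omega
    rw [show ((26:Int)^(3:Nat)) = 17576 by norm_num, hd]
    simpa using (pvDiv26 0 i hi.1 hi.2).2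
  have e2 : PySem.Int.mod (PySem.Int.floordiv (i * 17576 + j * 676 + k * 26 + l) ((26:Int)^(2:Nat))) 26 = j := by
    have hd : PySem.Int.floordiv (i * 17576 + j * 676 + k * 26 + l) 676 = i * 26 + j := by
      rw [PySem.Int.floordiv_eq_iff_of_pos (by omega)]; omega
    rw [show ((26:Int)^(2:Nat)) = 676 by norm_num, hd]
    exact (pvDiv26 i j hj.1 hj.2).2
  have e1 : PySem.Int.mod (PySem.Int.floordiv (i * 17576 + j * 676 + k * 26 + l) ((26:Int)^(1:Nat))) 26 = k := by
    have hd : PySem.Int.floordiv (i * 17576 + j * 676 + k * 26 + l) 26 = i * 676 + j * 26 + k := by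
      rw [PySem.Int.floordiv_eq_iff_of_pos (by omega)]; omega
    rw [show ((26:Int)^(1:Nat)) = 26 by norm_num, hd]
    have := (pvDiv26 (i * 26 + j) k hk.1 hk.2).2
    rw [show (i * 26 + j) * 26 + k = i * 676 + j * 26 + k by ring] at this
    exact this
  have e0 : PySem.Int.mod (PySem.Int.floordiv (i * 17576 + j * 676 + k * 26 + l) ((26:Int)^(0:Nat))) 26 = l := by
    have hd : PySem.Int.floordiv (i * 17576 + j * 676 + k * 26 + l) 1 = i * 17576 + j * 676 + k * 26 + l := by
      rw [PySem.Int.floordiv_eq_iff_of_pos (by omega)]; omega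
    rw [show ((26:Int)^(0:Nat)) = 1 by norm_num, hd]
    have := (pvDiv26 (i * 676 + j * 26 + k) l hl.1 hl.2).2
    rw [show (i * 676 + j * 26 + k) * 26 + l = i * 17576 + j * 676 + k * 26 + l by ring] at this
    exact this
  simp only [pvG, ht, hdm.1, hdm.2, List.map_cons, List.map_nil, e3, e2, e1, e0]
  rfl

-- the uppercase alphabet is the image of pvChar on range(26)
theorem pvCharList : "ABCDEFGHIJKLMNOPQRSTUVWXYZ".toList = (PySem.List.pyRange 0 26 1).map pvChar := by
  decide

-- the flattened candidate list of A's combo branch equals B's decoded range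
theorem pvComboFlat :
    ((PySem.List.pyRange 0 ((26 : Int) ^ 4 * 101) 1).map pvG)
      = "ABCDEFGHIJKLMNOPQRSTUVWXYZ".toList.flatMap (fun a =>
          "ABCDEFGHIJKLMNOPQRSTUVWXYZ".toList.flatMap (fun b =>
            "ABCDEFGHIJKLMNOPQRSTUVWXYZ".toList.flatMap (fun c =>
              "ABCDEFGHIJKLMNOPQRSTUVWXYZ".toList.flatMap (fun d =>
                (PySem.List.pyRange 1950 2051 1).map (fun y =>
                  String.ofList [a, b, c, d] ++ PySem.Int.toStr y))))) := by
  rw [pvCharList]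
  simp only [List.flatMap_map]
  rw [show ((26:Int)^4*101) = 26 * (26^3*101) by ring,
     pvMapPyRangeMul pvG 26 (26^3*101) (by norm_num) (by norm_num)]
  apply pvFlatMapCongr
  intro i hi
  obtain ⟨hi0, hi1⟩ := PySem.List.mem_pyRange_one.1 hi
  rw [show ((26:Int)^3*101) = 26 * (26^2*101) by ring,
     pvMapPyRangeMul _ 26 (26^2*101) (by norm_num) (by norm_num)]
  apply pvFlatMapCongr
  intro j hj
  obtain ⟨hj0, hj1⟩ := PySem.List.mem_pyRange_one.1 hj
  rw [show ((26:Int)^2*101) = 26 * (26*101) by ring,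
     pvMapPyRangeMul _ 26 (26*101) (by norm_num) (by norm_num)]
  apply pvFlatMapCongr
  intro k hk
  obtain ⟨hk0, hk1⟩ := PySem.List.mem_pyRange_one.1 hk
  rw [show ((26:Int)*101) = 26 * 101 by ring,
     pvMapPyRangeMul _ 26 101 (by norm_num) (by norm_num)]
  apply pvFlatMapCongr
  intro l hl
  obtain ⟨hl0, hl1⟩ := PySem.List.mem_pyRange_one.1 hl
  have hshift := pvMapPyRangeShift
    (fun y => String.ofList [pvChar i, pvChar j, pvChar k, pvChar l] ++ PySem.Int.toStr y) 1950 0 101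
  rw [show (1950:Int) + 0 = 1950 by ring, show (1950:Int) + 101 = 2051 by ring] at hshift
  rw [hshift]
  apply List.map_congr_left
  intro m hm
  obtain ⟨hm0, hm1⟩ := PySem.List.mem_pyRange_one.1 hm
  have h := pvGEval i j k l m ⟨hi0, hi1⟩ ⟨hj0, hj1⟩ ⟨hk0, hk1⟩ ⟨hl0, hl1⟩ ⟨hm0, hm1⟩
  rw [← h]
  congr 1

-- A's name branch equals B's jumped range
theorem pvNameBranch (skip : Int) (pfx : String) :
    (List.foldl (fun (st : Int × List String) y =>
        if st.1 < skip then (st.1 + 1, st.2)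
        else (st.1, st.2 ++ [pfx ++ PySem.Int.toStr y])) ((0 : Int), ([] : List String))
        (PySem.List.pyRange 1950 2051 1)).2
      = (PySem.List.pyRange (1950 + max skip 0) 2051 1).map (fun y => pfx ++ PySem.Int.toStr y) := by
  have h1 : (List.foldl (fun (st : Int × List String) y =>
        if st.1 < skip then (st.1 + 1, st.2)
        else (st.1, st.2 ++ [pfx ++ PySem.Int.toStr y])) ((0 : Int), ([] : List String))
        (PySem.List.pyRange 1950 2051 1))
      = List.foldl (pvStep skip) ((0 : Int), ([] : List String))
          ((PySem.List.pyRange 1950 2051 1).map (fun y => pfx ++ PySem.Int.toStr y)) :=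
    (List.foldl_map (f := fun y => pfx ++ PySem.Int.toStr y) (g := pvStep skip)
      (l := PySem.List.pyRange 1950 2051 1) (init := ((0 : Int), ([] : List String)))).symm
  rw [h1, pvSkipFoldl]
  simp only [List.nil_append, sub_zero]
  rw [← List.map_drop, pvDropPyRange, Int.toNat_eq_max]

-- A's combo branch (nested loops with the shared skip counter) equals B's decoded jumped range
theorem pvComboBranch (skip : Int) :
    (("ABCDEFGHIJKLMNOPQRSTUVWXYZ".toList).foldl (fun st0 a =>
      ("ABCDEFGHIJKLMNOPQRSTUVWXYZ".toList).foldl (fun st1 b =>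
        ("ABCDEFGHIJKLMNOPQRSTUVWXYZ".toList).foldl (fun st2 c =>
          ("ABCDEFGHIJKLMNOPQRSTUVWXYZ".toList).foldl (fun st3 d =>
            (PySem.List.pyRange 1950 2051 1).foldl (fun (st : Int × List String) y =>
              if st.1 < skip then (st.1 + 1, st.2)
              else (st.1, st.2 ++ [String.ofList [a, b, c, d] ++ PySem.Int.toStr y])) st3)
          st2) st1) st0) ((0 : Int), ([] : List String))).2
    = (PySem.List.pyRange (max skip 0) ((26 : Int) ^ 4 * 101) 1).map pvG := by
  have htr : (("ABCDEFGHIJKLMNOPQRSTUVWXYZ".toList.flatMap (fun a =>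
          "ABCDEFGHIJKLMNOPQRSTUVWXYZ".toList.flatMap (fun b =>
            "ABCDEFGHIJKLMNOPQRSTUVWXYZ".toList.flatMap (fun c =>
              "ABCDEFGHIJKLMNOPQRSTUVWXYZ".toList.flatMap (fun d =>
                (PySem.List.pyRange 1950 2051 1).map (fun y =>
                  String.ofList [a, b, c, d] ++ PySem.Int.toStr y)))))).foldl
        (pvStep skip) ((0 : Int), ([] : List String))).2
      = (PySem.List.pyRange (max skip 0) ((26 : Int) ^ 4 * 101) 1).map pvG := by
    rw [pvSkipFoldl]
    simp only [List.nil_append, sub_zero]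
    rw [← pvComboFlat, ← List.map_drop, pvDropPyRange, Int.toNat_eq_max, zero_add]
  rw [← htr]
  refine congrArg Prod.snd ?_
  symm
  simp only [pvFoldlFlatMap, List.foldl_map, pvStep]

-- ===== VERDICT (by name: the statement is the Claim_ definition above) =====
theorem aadhaar_gen_spec : Claim_equal_aadhaar_gen := by
  intro name skip _
  unfold Spec_aadhaar_gen
  by_cases h : name = ""
  · subst h
    simp only [aadhaar_gen, aadhaar_gen_alt]
    rw [if_neg (by simp), if_neg (by simp)]
    exact pvComboBranch skip
  · simp only [aadhaar_gen, aadhaar_gen_alt]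
    rw [if_pos h, if_pos h]
    exact pvNameBranch skip _
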